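-- pv_equiv track=rewrite | github.com/tianrking/motorbridge | bindings/python/examples/dm_serial_leader_monitor_demo.py | _flatten_tokens
-- ===== SOURCE A (Python) =====
-- def _flatten_tokens(tokens: list[str]) -> list[str]:
--     out: list[str] = []
--     for token in tokens:
--         for item in token.split(","):
--             item = item.strip()
--             if item:
--                 out.append(item)
--     return out
-- ===== SOURCE B (Python) =====
-- def _flatten_tokens(tokens: list[str]) -> list[str]:
--     pieces = ",".join(tokens).split(",")
--     return [s for s in (p.strip() for p in pieces) if s]
-- ===== Notes on version B (the rewrite author's own statement) =====
-- stated objective: simpler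
-- what changed: Replaces the nested per-token split-and-append loops with one ','.join over all tokens, a single split of the combined buffer, and one strip-and-filter pass.
import Mathlib
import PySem

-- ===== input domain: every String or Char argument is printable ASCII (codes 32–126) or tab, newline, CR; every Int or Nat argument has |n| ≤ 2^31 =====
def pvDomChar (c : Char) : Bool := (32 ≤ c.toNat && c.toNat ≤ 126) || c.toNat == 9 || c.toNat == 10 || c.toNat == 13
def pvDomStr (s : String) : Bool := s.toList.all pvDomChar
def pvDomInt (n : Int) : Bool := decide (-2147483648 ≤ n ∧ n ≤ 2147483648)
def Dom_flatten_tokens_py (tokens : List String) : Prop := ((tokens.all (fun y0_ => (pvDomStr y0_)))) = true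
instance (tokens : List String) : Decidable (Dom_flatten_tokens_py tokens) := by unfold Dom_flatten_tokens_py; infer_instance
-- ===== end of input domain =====

-- B joins all tokens with "," and does ONE split over the combined buffer, then one strip-and-filter
-- pass (objective: simpler — the nested per-token loop disappears); return values proved equal.

-- ===== PORT A =====
-- A: nested loops — outer over tokens, inner over token.split(","), appending stripped non-empty items.
def flatten_tokens_py (tokens : List String) : List String :=
  tokens.foldl (fun out token =>
    ((PySem.Str.split? token ",").getD []).foldl (fun out item =>
      let item := PySem.Str.strip item
      if item ≠ "" then out ++ [item] else out) out) []

-- ===== PORT B =====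
-- B: one ','.join, one split, one strip-and-filter comprehension.
def flatten_tokens_py_alt (tokens : List String) : List String :=
  let pieces := (PySem.Str.split? (PySem.Str.join "," tokens) ",").getD []
  (pieces.map (fun p => PySem.Str.strip p)).filter (fun s => s ≠ "")

-- ===== PRECONDITION & SPEC =====
def Spec_flatten_tokens_py (tokens : List String) (out : List String) : Prop := out = flatten_tokens_py_alt tokens
instance (tokens : List String) (out : List String) : Decidable (Spec_flatten_tokens_py tokens out) := by unfold Spec_flatten_tokens_py; infer_instance

-- ===== CLAIM (what is proved, stated in full; the proofs are below) =====
def Claim_equal_flatten_tokens_py : Prop := ∀ (tokens : List String), Dom_flatten_tokens_py tokens → Spec_flatten_tokens_py tokens (flatten_tokens_py tokens)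

-- ===== LEMMAS AND PROOFS =====

-- PySem's fuelled single-separator split agrees with Mathlib's `List.splitOn`.
theorem pysplitOn_go_eq (c : Char) (fuel : Nat) (l cur : List Char) (acc : List (List Char))
    (h : l.length < fuel) :
    PySem.Chars.splitOn.go [c] fuel l cur acc
      = acc.reverse ++ (l.splitOn c).modifyHead (cur.reverse ++ ·) := by
  induction fuel generalizing l cur acc with
  | zero => omega
  | succ fuel ih =>
    cases l with
    | nil =>
      rw [PySem.Chars.splitOn.go.eq_def]
      simp [List.splitOn, List.splitOnP_nil]
    | cons x rest =>
      rw [PySem.Chars.splitOn.go.eq_def]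
      by_cases hx : x = c
      · subst hx
        have hpre : List.isPrefixOf [x] (x :: rest) = true := by
          simp [List.isPrefixOf]
        simp only [hpre, if_pos, List.length_cons, List.length_nil, List.drop_succ_cons,
          List.drop_zero]
        rw [ih rest [] (cur.reverse :: acc) (by simpa using Nat.lt_of_succ_lt_succ h)]
        simp [List.splitOn, List.splitOnP_cons]
        cases List.splitOnP (fun y => y == x) rest <;> simp
      · have hpre : List.isPrefixOf [x] (x :: rest) = true := by
          simp [List.isPrefixOf]
        have hpre' : List.isPrefixOf [c] (x :: rest) = false := by
          simp only [List.isPrefixOf, Bool.and_eq_false_iff, beq_eq_false_iff_ne]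
          exact Or.inl fun hcx => hx hcx.symm
        simp only [hpre', Bool.false_eq_true, if_false]
        rw [ih rest (x :: cur) acc (by simpa using Nat.lt_of_succ_lt_succ h)]
        obtain ⟨hd, tl, hsp⟩ := List.exists_cons_of_ne_nil (List.splitOnP_ne_nil (· == c) rest)
        simp [List.splitOn, List.splitOnP_cons, hx, hsp]

theorem pysplitOn_eq (c : Char) (s : List Char) :
    PySem.Chars.splitOn s [c] = s.splitOn c := by
  rw [PySem.Chars.splitOn, pysplitOn_go_eq c (s.length + 1) s [] [] (by omega)]
  obtain ⟨hd, tl, hsp⟩ := List.exists_cons_of_ne_nil (List.splitOnP_ne_nil (· == c) s)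
  simp [List.splitOn] at hsp ⊢
  simp [hsp]

-- splitting the c-intercalation of a nonempty list of parts concatenates the parts' splits
theorem splitOn_intercalate_flat (c : Char) (parts : List (List Char)) (h : parts ≠ []) :
    ([c].intercalate parts).splitOn c = parts.flatMap (fun p => p.splitOn c) := by
  induction parts with
  | nil => exact absurd rfl h
  | cons p rest ih =>
    cases rest with
    | nil => simp [List.intercalate]
    | cons q rest' =>
      have hform : [c].intercalate (p :: q :: rest') = p ++ c :: [c].intercalate (q :: rest') := by
        simp [List.intercalate, List.intersperse]
      rw [hform]
      simp only [List.splitOn] at ih ⊢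
      rw [List.splitOnP_append_cons _ _ _ c (by simp), ih (by simp)]
      simp

-- String-level: one split over the joined buffer = concatenation of the per-token splits
theorem split_join_eq (tokens : List String) (h : tokens ≠ []) :
    (PySem.Str.split? (PySem.Str.join "," tokens) ",").getD []
      = tokens.flatMap (fun t => (PySem.Str.split? t ",").getD []) := by
  have hc : ("," : String).toList = [','] := by decide
  simp only [PySem.Str.split?, PySem.Str.join, PySem.Chars.split?, PySem.Chars.join, hc]
  simp only [List.isEmpty_cons, Bool.false_eq_true, if_false, Option.getD_some, Option.map_some]
  rw [String.toList_ofList, pysplitOn_eq,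
    splitOn_intercalate_flat ',' (tokens.map String.toList) (by simpa using h)]
  rw [List.map_flatMap, List.flatMap_map]
  refine List.flatMap_congr fun t _ => ?_
  simp [pysplitOn_eq]

-- A's nested accumulator loops, flattened
theorem portA_eq_flatMap (tokens : List String) :
    flatten_tokens_py tokens
      = tokens.flatMap (fun t =>
          (((PySem.Str.split? t ",").getD []).map (fun p => PySem.Str.strip p)).filter
            (fun s => s ≠ "")) := by
  unfold flatten_tokens_py
  rw [PySem.List.foldl_congr_mem' (g := fun out token =>
      out ++ ((((PySem.Str.split? token ",").getD []).map (fun p => PySem.Str.strip p)).filter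
        (fun s => s ≠ "")))]
  · rw [PySem.List.foldl_append_eq_flatMap]; simp
  · intro token _ out
    rw [← List.foldl_map (f := fun p => PySem.Str.strip p)
      (g := fun out item => if item ≠ "" then out ++ [item] else out)]
    exact PySem.List.foldl_append_ite_eq_filter _ _ _

-- ===== VERDICT (by name: the statement is the Claim_ definition above) =====
theorem flatten_tokens_py_spec : Claim_equal_flatten_tokens_py := by
  intro tokens _
  unfold Spec_flatten_tokens_py
  rcases eq_or_ne tokens [] with h | h
  · subst h; decide
  · unfold flatten_tokens_py_alt
    rw [portA_eq_flatMap, split_join_eq tokens h]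
    simp only [List.map_flatMap, List.filter_flatMap]
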